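-- pv_equiv track=rewrite | github.com/JamesLeberknight/footbag-results | tools/50_build_review_packet.py | render_pbp_excerpt
-- ===== SOURCE A (Python) =====
-- from collections import defaultdict
--
-- def render_pbp_excerpt(pbp_rows, max_divs=3, max_places=3):
--     """Render a short text excerpt from PBP rows."""
--     if not pbp_rows:
--         return "(no canonical results)"
--     by_div = defaultdict(list)
--     for r in pbp_rows:
--         div = r.get('division_canon', '')
--         by_div[div].append(r)
--     lines = []
--     truncated = False
--     for i, (div, entries) in enumerate(by_div.items()):
--         if i >= max_divs:
--             truncated = True
--             break
--         n = len(entries)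
--         lines.append(f"Division: {div} ({n} placements)")
--         shown = 0
--         for e in sorted(entries, key=lambda x: int(x.get('place', 99)) if str(x.get('place', 99)).isdigit() else 99):
--             if shown >= max_places:
--                 break
--             place = e.get('place', '?')
--             team = e.get('team_display_name', '')
--             person = e.get('person_canon', '')
--             name = team if team else person
--             lines.append(f"  {place}. {name}")
--             shown += 1
--         if n > max_places:
--             lines.append(f"  ...")
--     if truncated:
--         lines.append("...")
--     return "\n".join(lines)
-- ===== SOURCE B (Python) =====
-- import heapq
--
--
-- def _place_key(e):
--     p = str(e.get('place', 99))
--     return int(p) if p.isdigit() else 99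
--
--
-- def _div_block(div, entries, max_places):
--     lines = [f"Division: {div} ({len(entries)} placements)"]
--     for e in heapq.nsmallest(max_places, entries, key=_place_key):
--         name = e.get('team_display_name', '') or e.get('person_canon', '')
--         lines.append(f"  {e.get('place', '?')}. {name}")
--     if len(entries) > max_places:
--         lines.append("  ...")
--     return lines
--
--
-- def render_pbp_excerpt(pbp_rows, max_divs=3, max_places=3):
--     if not pbp_rows:
--         return "(no canonical results)"
--     by_div = {}
--     for r in pbp_rows:
--         by_div.setdefault(r.get('division_canon', ''), []).append(r)
--     items = list(by_div.items())
--     blocks = [_div_block(div, entries, max_places)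
--               for div, entries in items[:max(max_divs, 0)]]
--     if len(items) > max_divs:
--         blocks.append(["..."])
--     return "\n".join(line for block in blocks for line in block)
-- ===== Notes on version B (the rewrite author's own statement) =====
-- stated objective: alternative
-- what changed: The enumerate-with-break division loop and the per-division full-sort-plus-counter-break loop are replaced by a slice of the grouped items (truncation decided by a length comparison) and heap-based top-k selection via heapq.nsmallest, with each division rendered as an independent block that is flattened at the end.
import Mathlib
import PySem

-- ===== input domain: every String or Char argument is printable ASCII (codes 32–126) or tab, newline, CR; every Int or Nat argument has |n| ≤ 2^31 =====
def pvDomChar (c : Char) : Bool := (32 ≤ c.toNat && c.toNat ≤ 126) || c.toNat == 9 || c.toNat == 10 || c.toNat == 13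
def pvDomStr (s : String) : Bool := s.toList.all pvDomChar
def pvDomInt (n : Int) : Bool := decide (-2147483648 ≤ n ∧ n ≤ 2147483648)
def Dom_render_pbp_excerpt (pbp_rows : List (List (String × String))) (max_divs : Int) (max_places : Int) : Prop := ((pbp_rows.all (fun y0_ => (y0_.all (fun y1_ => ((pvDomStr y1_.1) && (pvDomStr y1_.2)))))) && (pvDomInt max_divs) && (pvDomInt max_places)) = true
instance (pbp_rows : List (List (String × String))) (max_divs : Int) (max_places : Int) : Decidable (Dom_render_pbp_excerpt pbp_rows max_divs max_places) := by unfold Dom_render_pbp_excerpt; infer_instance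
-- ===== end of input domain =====

-- ===== PORT A =====
-- B replaces the enumerate/break division loop and the sort-then-count inner loop by a
-- slice of the grouped items plus heap-based top-k selection (heapq.nsmallest); alternative
-- decomposition, same return value.

-- r.get(k, dflt) on a row dict
def pvRowGetA (r : List (String × String)) (k dflt : String) : String :=
  (PySem.Dict.mk r).getD k dflt

-- sort key: int(x.get('place', 99)) if str(x.get('place', 99)).isdigit() else 99
-- (a missing key gives the int 99: str(99) = "99" is a digit string and int("99") = 99)
def pvKeyA (e : List (String × String)) : Int :=
  match (PySem.Dict.mk e).get? "place" with
  | some s => if PySem.Str.strIsdigit s then (PySem.Int.ofStr? s).getD 99 else 99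
  | none => 99

-- f"  {place}. {name}" with name = team if team else person
def pvLineA (e : List (String × String)) : String :=
  let team := pvRowGetA e "team_display_name" ""
  let name := if team = "" then pvRowGetA e "person_canon" "" else team
  "  " ++ pvRowGetA e "place" "?" ++ ". " ++ name

-- the inner 'for e in sorted(...): if shown >= max_places: break' loop of A
def pvInnerA (max_places : Int) : List (List (String × String)) → Int → List String → List String
  | [], _, lines => lines
  | e :: rest, shown, lines =>
    if max_places ≤ shown then lines
    else pvInnerA max_places rest (shown + 1) (lines ++ [pvLineA e])

-- the outer 'for i, (div, entries) in enumerate(by_div.items())' loop of A, with the break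
def pvOuterA (max_divs max_places : Int) :
    List (String × List (List (String × String))) → Int → List String → List String × Bool
  | [], _, lines => (lines, false)
  | (div, entries) :: rest, i, lines =>
    if max_divs ≤ i then (lines, true)
    else
      let n : Int := (entries.length : Int)
      let lines1 := lines ++ ["Division: " ++ div ++ " (" ++ PySem.Int.toStr n ++ " placements)"]
      let lines2 := pvInnerA max_places (PySem.List.sorted entries pvKeyA) 0 lines1
      let lines3 := if max_places < n then lines2 ++ ["  ..."] else lines2
      pvOuterA max_divs max_places rest (i + 1) lines3

def render_pbp_excerpt (pbp_rows : List (List (String × String))) (max_divs : Int) (max_places : Int) : String :=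
  if pbp_rows = [] then "(no canonical results)"
  else
    let by_div := pbp_rows.foldl
      (fun d r => d.modify (pvRowGetA r "division_canon" "") [] (· ++ [r])) PySem.Dict.empty
    let res := pvOuterA max_divs max_places by_div.items 0 []
    PySem.Str.join "\n" (if res.2 then res.1 ++ ["..."] else res.1)

-- ===== PORT B =====

def pvRowGetB (r : List (String × String)) (k dflt : String) : String :=
  (PySem.Dict.mk r).getD k dflt

-- _place_key of Source B
def pvPlaceKeyB (e : List (String × String)) : Int :=
  match (PySem.Dict.mk e).get? "place" with
  | some s => if PySem.Str.strIsdigit s then (PySem.Int.ofStr? s).getD 99 else 99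
  | none => 99

-- heapq.nsmallest(n, xs, key): the n smallest elements in sorted (stable) order;
-- [] for n <= 0 (library call, ported by its contract)
def pvNsmallest (n : Int) (xs : List (List (String × String)))
    (key : List (String × String) → Int) : List (List (String × String)) :=
  if n ≤ 0 then [] else (PySem.List.sorted xs key).take n.toNat

-- _div_block of Source B
def pvDivBlockB (div : String) (entries : List (List (String × String))) (max_places : Int) :
    List String :=
  ["Division: " ++ div ++ " (" ++ PySem.Int.toStr (entries.length : Int) ++ " placements)"]
  ++ (pvNsmallest max_places entries pvPlaceKeyB).map (fun e =>
       let name := if pvRowGetB e "team_display_name" "" = "" then pvRowGetB e "person_canon" ""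
                   else pvRowGetB e "team_display_name" ""
       "  " ++ pvRowGetB e "place" "?" ++ ". " ++ name)
  ++ (if max_places < (entries.length : Int) then ["  ..."] else [])

def render_pbp_excerpt_alt (pbp_rows : List (List (String × String))) (max_divs : Int) (max_places : Int) : String :=
  if pbp_rows = [] then "(no canonical results)"
  else
    let by_div := pbp_rows.foldl
      (fun d r =>
        -- by_div.setdefault(k, []).append(r): a new key gets [r] at the end,
        -- an existing key has r appended to its list in place
        let k := pvRowGetB r "division_canon" ""
        if d.contains k then d.modify k [] (· ++ [r]) else d.insert k [r])
      PySem.Dict.empty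
    let items := by_div.items
    -- items[:max(max_divs, 0)] with a nonnegative bound is take
    let blocks := (items.take (max max_divs 0).toNat).map (fun p => pvDivBlockB p.1 p.2 max_places)
    let blocks := if max_divs < (items.length : Int) then blocks ++ [["..."]] else blocks
    PySem.Str.join "\n" blocks.flatten

-- ===== PRECONDITION & SPEC =====
def Spec_render_pbp_excerpt (pbp_rows : List (List (String × String))) (max_divs : Int) (max_places : Int) (out : String) : Prop := out = render_pbp_excerpt_alt pbp_rows max_divs max_places
instance (pbp_rows : List (List (String × String))) (max_divs : Int) (max_places : Int) (out : String) : Decidable (Spec_render_pbp_excerpt pbp_rows max_divs max_places out) := by unfold Spec_render_pbp_excerpt; infer_instance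

-- ===== CLAIM (what is proved, stated in full; the proofs are below) =====
def Claim_equal_render_pbp_excerpt : Prop := ∀ (pbp_rows : List (List (String × String))) (max_divs : Int) (max_places : Int), Dom_render_pbp_excerpt pbp_rows max_divs max_places → Spec_render_pbp_excerpt pbp_rows max_divs max_places (render_pbp_excerpt pbp_rows max_divs max_places)

-- ===== LEMMAS AND PROOFS =====

-- the two grouping fold steps agree
theorem pv_step_eq (d : PySem.Dict String (List (List (String × String)))) (r : List (String × String)) :
    (let k := pvRowGetB r "division_canon" ""
     if d.contains k then d.modify k [] (· ++ [r]) else d.insert k [r])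
    = d.modify (pvRowGetA r "division_canon" "") [] (· ++ [r]) := by
  have hk : pvRowGetB r "division_canon" "" = pvRowGetA r "division_canon" "" := rfl
  show (if d.contains (pvRowGetB r "division_canon" "") then _ else _) = _
  rw [hk]
  by_cases h : d.contains (pvRowGetA r "division_canon" "")
  · rw [if_pos h]
  · rw [if_neg h, PySem.Dict.modify, PySem.Dict.getD_of_not_contains]
    · simp
    · simpa using h

-- A's inner loop appends the first (max_places - shown) sorted entries
theorem pv_inner_eq (mp : Int) (xs : List (List (String × String))) :
    ∀ (shown : Int) (lines : List String),
      pvInnerA mp xs shown lines = lines ++ (xs.take (mp - shown).toNat).map pvLineA := by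
  induction xs with
  | nil => intro shown lines; simp [pvInnerA]
  | cons e rest ih =>
    intro shown lines
    by_cases h : mp ≤ shown
    · have h0 : (mp - shown).toNat = 0 := by omega
      simp [pvInnerA, h, h0]
    · have h2 : (mp - shown).toNat = (mp - (shown + 1)).toNat + 1 := by omega
      simp [pvInnerA, h, ih, h2, List.take_succ_cons]

theorem pv_nsmallest_eq (n : Int) (xs : List (List (String × String)))
    (key : List (String × String) → Int) :
    pvNsmallest n xs key = (PySem.List.sorted xs key).take n.toNat := by
  unfold pvNsmallest
  split_ifs with h
  · have h0 : n.toNat = 0 := by omega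
    simp [h0]
  · rfl

-- A's per-division block is B's _div_block
theorem pv_block_eq (mp : Int) (div : String) (entries : List (List (String × String))) :
    (["Division: " ++ div ++ " (" ++ PySem.Int.toStr (entries.length : Int) ++ " placements)"]
      ++ ((PySem.List.sorted entries pvKeyA).take mp.toNat).map pvLineA
      ++ (if mp < (entries.length : Int) then ["  ..."] else []))
    = pvDivBlockB div entries mp := by
  unfold pvDivBlockB
  rw [pv_nsmallest_eq]
  rfl

-- A's outer loop: the shown divisions are a take, the truncation flag a length test
theorem pv_outer_eq (md mp : Int) (items : List (String × List (List (String × String)))) :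
    ∀ (i : Int) (lines : List String),
      pvOuterA md mp items i lines
      = (lines ++ (items.take (md - i).toNat).flatMap (fun p => pvDivBlockB p.1 p.2 mp),
         !items.isEmpty && decide (md < i + (items.length : Int))) := by
  induction items with
  | nil => intro i lines; simp [pvOuterA]
  | cons p rest ih =>
    intro i lines
    obtain ⟨div, entries⟩ := p
    by_cases h : md ≤ i
    · have h0 : (md - i).toNat = 0 := by omega
      have hlt : md < i + ((rest.length : Int) + 1) := by omega
      simp [pvOuterA, h, h0, hlt]
    · have h2 : (md - i).toNat = (md - (i + 1)).toNat + 1 := by omega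
      rw [show pvOuterA md mp ((div, entries) :: rest) i lines
            = pvOuterA md mp rest (i + 1)
                (if mp < (entries.length : Int) then
                    (pvInnerA mp (PySem.List.sorted entries pvKeyA) 0
                      (lines ++ ["Division: " ++ div ++ " (" ++ PySem.Int.toStr (entries.length : Int) ++ " placements)"]))
                    ++ ["  ..."]
                 else
                    pvInnerA mp (PySem.List.sorted entries pvKeyA) 0
                      (lines ++ ["Division: " ++ div ++ " (" ++ PySem.Int.toStr (entries.length : Int) ++ " placements)"]))
            from by simp [pvOuterA, h]]
      rw [ih]
      rw [pv_inner_eq]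
      simp only [Prod.mk.injEq]
      refine ⟨?_, ?_⟩
      · rw [h2, List.take_succ_cons]
        simp only [List.flatMap_cons, sub_zero]
        rw [← pv_block_eq mp div entries]
        split_ifs with hc <;> simp [List.append_assoc]
      · cases rest with
        | nil =>
          have : ¬ md < i + 1 := by omega
          simp [this]
        | cons q rs =>
          simp only [List.isEmpty_cons, Bool.not_false, Bool.true_and, decide_eq_decide,
            List.length_cons]
          push_cast
          omega

-- each grouping step keeps the dict nonempty, and the first step makes it so
theorem pv_step_items_ne (d : PySem.Dict String (List (List (String × String)))) (r : List (String × String))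
    (h : d.items ≠ []) :
    (d.modify (pvRowGetA r "division_canon" "") [] (· ++ [r])).items ≠ [] := by
  rw [PySem.Dict.modify, PySem.Dict.items_insert]
  split_ifs with hc
  · simpa using h
  · simp

theorem pv_foldl_items_ne (rows : List (List (String × String)))
    (d : PySem.Dict String (List (List (String × String)))) (h : d.items ≠ []) :
    (rows.foldl (fun d r => d.modify (pvRowGetA r "division_canon" "") [] (· ++ [r])) d).items ≠ [] := by
  induction rows generalizing d with
  | nil => simpa using h
  | cons r rs ih => exact ih _ (pv_step_items_ne d r h)

-- the grouped dict of a nonempty row list has items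
theorem pv_items_ne (rows : List (List (String × String))) (hne : rows ≠ []) :
    (rows.foldl (fun d r => d.modify (pvRowGetA r "division_canon" "") [] (· ++ [r]))
      (PySem.Dict.empty : PySem.Dict String (List (List (String × String))))).items ≠ [] := by
  cases rows with
  | nil => exact absurd rfl hne
  | cons r rs =>
    rw [List.foldl_cons]
    refine pv_foldl_items_ne rs _ ?_
    rw [PySem.Dict.modify, PySem.Dict.items_insert]
    split_ifs with hc
    · simp at hc
    · simp

-- ===== VERDICT (by name: the statement is the Claim_ definition above) =====
theorem render_pbp_excerpt_spec : Claim_equal_render_pbp_excerpt := by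
  intro pbp_rows md mp _dom
  unfold Spec_render_pbp_excerpt render_pbp_excerpt render_pbp_excerpt_alt
  by_cases hrows : pbp_rows = []
  · simp [hrows]
  · simp only [hrows, if_false]
    simp only [pv_step_eq]
    set items := (pbp_rows.foldl
      (fun d r => d.modify (pvRowGetA r "division_canon" "") [] (· ++ [r]))
      (PySem.Dict.empty : PySem.Dict String (List (List (String × String))))).items with hitems
    have hne : items ≠ [] := pv_items_ne pbp_rows hrows
    rw [pv_outer_eq]
    have hmax : (max md 0).toNat = (md - 0).toNat := by omega
    rw [← hmax]
    have hIE : items.isEmpty = false := List.isEmpty_eq_false_iff.mpr hne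
    simp only [hIE, Bool.not_false, Bool.true_and]
    congr 1
    by_cases hflag : md < 0 + (items.length : Int)
    · have hflag' : md < (items.length : Int) := by omega
      simp [hflag', List.flatMap_def]
    · have hflag' : ¬ md < (items.length : Int) := by omega
      simp [hflag', List.flatMap_def]
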